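-- pv_equiv track=rewrite | github.com/vachanaj/D0012E-2025 | test.py | check_sum_n2
-- ===== SOURCE A (Python) =====
-- def check_sum_n2(A, n=None):
--     #checks for x + y = z in A using a O(n^2) incremental approach
--     #and sorting the prefix A[0...n-1] in place.
--
--     if n is None: #check len of n
--         k = 0
--         while True:
--             try:
--                 _ = A[k]
--                 k += 1
--             except IndexError:
--                 break
--             n = k
--
--     # base case
--     if n < 3:
--         return 0
--
--     # check the subarray A[0...n-2], return 1 if true
--     if check_sum_n2(A, n - 1):
--         return 1
--
--     # incremental sort (insertion sort step - O(n))
--     # A[0...n-2] is sorted. insert A[n-1] into the correct spot in A[0...n-1]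
--
--     # store the element to be inserted
--     a_n = A[n - 1]
--     j = n - 2
--
--     # move elements to the right if greater than a_n
--     while j >= 0 and A[j] > a_n:
--         A[j + 1] = A[j]
--         j -= 1
--
--     # insert a_n into its sorted position
--     A[j + 1] = a_n
--
--     # check Triplet (x + y = z)
--     # and if A[i] + A[j] = A[n-1] for i, j < n-1 using two pointers on the sorted prefix
--     z = A[n - 1]
--
--     i = 0         # left pointer
--     j = n - 2     # right
--
--     while i < j:
--         S = A[i] + A[j]
--
--         if S == z:
--             # x + y = z, where z is the new sorted element
--             return 1
--         elif S < z:
--             i += 1    # larger sum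
--         else: # S > z
--             j -= 1    # smaller sum
--
--     return 0
-- ===== SOURCE B (Python) =====
-- def check_sum_n2(A, n=None):
--     # Iterative bottom-up version: same length probe, then a forward loop
--     # m = 3..n doing the insertion step (position scan + slice splice) and
--     # the two-pointer check, instead of the original recursion.
--     if n is None:
--         k = 0
--         while True:
--             try:
--                 _ = A[k]
--                 k += 1
--             except IndexError:
--                 break
--             n = k
--
--     if n < 3:
--         return 0
--
--     for m in range(3, n + 1):
--         a = A[m - 1]
--         # find insertion position by scanning left from m-2
--         j = m - 2
--         while j >= 0 and A[j] > a:
--             j -= 1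
--         # splice: shift the block A[j+1 .. m-2] right by one, place a at j+1
--         A[j + 2:m] = A[j + 1:m - 1]
--         A[j + 1] = a
--         # two-pointer search for A[i] + A[q] == A[m-1] on the prefix
--         z = A[m - 1]
--         i, q = 0, m - 2
--         while i < q:
--             s = A[i] + A[q]
--             if s == z:
--                 return 1
--             if s < z:
--                 i += 1
--             else:
--                 q -= 1
--     return 0
-- ===== Notes on version B (the rewrite author's own statement) =====
-- stated objective: alternative
-- what changed: Replaces the top-down recursion by a bottom-up for-loop over prefix lengths m = 3..n, and replaces the shift-as-you-go insertion-sort pass by a position scan followed by one slice splice; the two-pointer check and the in-place mutation of A (same final array state) are preserved.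
import Mathlib
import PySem

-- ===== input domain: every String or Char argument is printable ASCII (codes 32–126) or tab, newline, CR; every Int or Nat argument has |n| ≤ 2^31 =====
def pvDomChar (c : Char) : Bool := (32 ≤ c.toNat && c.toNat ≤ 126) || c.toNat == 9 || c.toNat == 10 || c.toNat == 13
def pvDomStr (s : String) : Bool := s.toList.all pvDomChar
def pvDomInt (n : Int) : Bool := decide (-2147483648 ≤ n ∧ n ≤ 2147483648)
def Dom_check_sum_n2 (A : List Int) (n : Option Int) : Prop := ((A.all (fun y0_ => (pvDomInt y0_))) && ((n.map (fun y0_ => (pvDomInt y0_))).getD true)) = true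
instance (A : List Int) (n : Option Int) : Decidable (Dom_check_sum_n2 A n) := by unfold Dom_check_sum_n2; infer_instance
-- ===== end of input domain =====

-- B replaces A's top-down recursion by a bottom-up loop and A's element-by-element
-- shift insertion by a position scan plus one slice splice (objective: alternative).
-- Both versions mutate the Python argument A in place in the same way (same final
-- array state); the equivalence proved here is about the return value.

-- ===== PORT A =====
-- insertion-sort step of A: jp1 = j+1 where j is Python's loop variable
-- (the while loop 'while j >= 0 and A[j] > a_n' shifting elements right).
def insA (an : Int) : List Int → Nat → List Int
  | A, 0 => A.set 0 an
  | A, j + 1 => if A.getD j 0 > an then insA an (A.set (j + 1) (A.getD j 0)) j else A.set (j + 1) an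

-- two-pointer while loop of A ('while i < j: ...'); indices are nonnegative and
-- in range under Pre_, so List.getD is exact there.
def tpA (A : List Int) (z : Int) (i j : Nat) : Int :=
  if i < j then
    if A.getD i 0 + A.getD j 0 = z then 1
    else if A.getD i 0 + A.getD j 0 < z then tpA A z (i + 1) j
    else tpA A z i (j - 1)
  else 0
termination_by j - i
decreasing_by all_goals omega

-- tail of one recursion level after the insertion (A2 = the array after the step)
def csRecTail (A2 : List Int) (n : Nat) : Int × List Int :=
  (tpA A2 (A2.getD (n - 1) 0) 0 (n - 2), A2)

-- 'if check_sum_n2(A, n-1): return 1' and then the insertion + two-pointer part,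
-- given p = the recursive call's (result, mutated array)
def csRecAfter (p : Int × List Int) (n : Nat) : Int × List Int :=
  if p.1 ≠ 0 then (1, p.2)
  else csRecTail (insA (p.2.getD (n - 1) 0) p.2 (n - 1)) n

-- the recursion of A for integer n ≥ 0 (state = the mutated array, threaded through)
def csRecA (A : List Int) (n : Nat) : Int × List Int :=
  if n < 3 then (0, A)
  else csRecAfter (csRecA A (n - 1)) n
termination_by n
decreasing_by omega

-- the length-probing loop counts indices until IndexError, i.e. computes len(A);
-- on empty A the variable n stays None and 'n < 3' raises TypeError (outside Pre_).
def check_sum_n2 (A : List Int) (n : Option Int) : Int :=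
  match n with
  | none => if A.length = 0 then 0 else (csRecA A A.length).1
  | some m => (csRecA A m.toNat).1

-- ===== PORT B =====
-- scan left from j = m-2 for the first j with not (A[j] > a); returns j+1
def findPosB (A : List Int) (a : Int) : Nat → Nat
  | 0 => 0
  | j + 1 => if A.getD j 0 > a then findPosB A a j else j + 1

-- the splice 'A[p+1:m] = A[p:m-1]; A[p] = a' as one list rebuild
def spliceB (A : List Int) (a : Int) (p m : Nat) : List Int :=
  A.take p ++ a :: (A.drop p).take (m - 1 - p) ++ A.drop m

-- one body of B's for-loop up to the two-pointer scan
def stepB (A : List Int) (m : Nat) : List Int :=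
  let a := A.getD (m - 1) 0
  spliceB A a (findPosB A a (m - 1)) m

-- B's two-pointer while loop
def tpB (A : List Int) (z : Int) (i q : Nat) : Int :=
  if q ≤ i then 0
  else
    let s := A.getD i 0 + A.getD q 0
    if s = z then 1 else if s < z then tpB A z (i + 1) q else tpB A z i (q - 1)
termination_by q - i
decreasing_by all_goals omega

-- B's 'for m in range(3, n+1)' with early return 1
def csLoopB (A : List Int) (m N : Nat) : Int × List Int :=
  if N < m then (0, A)
  else if tpB (stepB A m) ((stepB A m).getD (m - 1) 0) 0 (m - 2) ≠ 0 then (1, stepB A m)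
  else csLoopB (stepB A m) (m + 1) N
termination_by N + 1 - m
decreasing_by omega

def check_sum_n2_alt (A : List Int) (n : Option Int) : Int :=
  match n with
  | none => if A.length = 0 then 0
            else if A.length < 3 then 0 else (csLoopB A 3 A.length).1
  | some m => if m < 3 then 0 else (csLoopB A 3 m.toNat).1

-- ===== PRECONDITION & SPEC =====
-- Pre_ excludes exactly the inputs on which Python A raises: n=None with empty A
-- (n stays None, 'n < 3' raises TypeError) and n=some m with 3 ≤ m > len(A)
-- (IndexError on A[m-1]); A returns on every other input.
def Pre_check_sum_n2 (A : List Int) (n : Option Int) : Prop :=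
  match n with
  | none => A ≠ []
  | some m => m < 3 ∨ m ≤ (A.length : Int)
instance (A : List Int) (n : Option Int) : Decidable (Pre_check_sum_n2 A n) := by
  unfold Pre_check_sum_n2; cases n <;> infer_instance

def pvWitness_check_sum_n2 : List Int × Option Int := ([1, 2, 3], none)

def Spec_check_sum_n2 (A : List Int) (n : Option Int) (out : Int) : Prop := out = check_sum_n2_alt A n
instance (A : List Int) (n : Option Int) (out : Int) : Decidable (Spec_check_sum_n2 A n out) := by unfold Spec_check_sum_n2; infer_instance

-- ===== CLAIM (what is proved, stated in full; the proofs are below) =====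
def Claim_equal_check_sum_n2 : Prop := ∀ (A : List Int) (n : Option Int), Dom_check_sum_n2 A n → Pre_check_sum_n2 A n → Spec_check_sum_n2 A n (check_sum_n2 A n)

-- ===== LEMMAS AND PROOFS =====

theorem findPos_le (A : List Int) (a : Int) : ∀ jp1, findPosB A a jp1 ≤ jp1 := by
  intro jp1
  induction jp1 with
  | zero => simp [findPosB]
  | succ j ih => simp only [findPosB]; split <;> omega

theorem findPos_set_high (a v : Int) : ∀ (jp1 k : Nat) (A : List Int), jp1 ≤ k →
    findPosB (A.set k v) a jp1 = findPosB A a jp1 := by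
  intro jp1
  induction jp1 with
  | zero => intro k A h; simp [findPosB]
  | succ j ih =>
      intro k A h
      have hne : k ≠ j := by omega
      simp only [findPosB, List.getD, List.getElem?_set_ne hne]
      split
      · exact ih k A (by omega)
      · rfl

theorem insA_eq (an : Int) : ∀ (jp1 : Nat) (A : List Int), jp1 < A.length →
    insA an A jp1 = spliceB A an (findPosB A an jp1) (jp1 + 1) := by
  intro jp1
  induction jp1 with
  | zero =>
      intro A h
      cases A with
      | nil => simp at h
      | cons x xs => simp [insA, findPosB, spliceB]
  | succ j ih =>
      intro A h
      simp only [insA, findPosB]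
      by_cases hgt : A.getD j 0 > an
      · simp only [if_pos hgt]
        have hlen : j < (A.set (j + 1) (A.getD j 0)).length := by simp; omega
        rw [ih _ hlen, findPos_set_high an (A.getD j 0) j (j + 1) A (by omega)]
        have hple : findPosB A an j ≤ j := findPos_le A an j
        set p := findPosB A an j with hp
        have hset : A.set (j + 1) (A.getD j 0)
            = A.take (j + 1) ++ A.getD j 0 :: A.drop (j + 2) := by
          rw [List.set_eq_take_append_cons_drop]
          simp [if_pos (by omega : j + 1 < A.length)]
        unfold spliceB
        rw [hset]
        have htk : (A.take (j + 1) ++ A.getD j 0 :: A.drop (j + 2)).take p = A.take p := by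
          rw [List.take_append_of_le_length (by simp; omega), List.take_take]
          congr 1; omega
        have hdp : (A.take (j + 1) ++ A.getD j 0 :: A.drop (j + 2)).drop p
            = (A.take (j + 1)).drop p ++ A.getD j 0 :: A.drop (j + 2) :=
          List.drop_append_of_le_length (by simp; omega)
        have hdj : (A.take (j + 1) ++ A.getD j 0 :: A.drop (j + 2)).drop (j + 1)
            = A.getD j 0 :: A.drop (j + 2) := by
          have h1 : (A.take (j + 1)).length = j + 1 := by simp; omega
          exact List.drop_left' h1
        have hmidL : ((A.take (j + 1)).drop p ++ A.getD j 0 :: A.drop (j + 2)).take (j + 1 - 1 - p)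
            = (A.drop p).take (j - p) := by
          have h2 : j + 1 - 1 - p = j - p := by omega
          rw [h2, List.take_append_of_le_length (by simp; omega), List.drop_take, List.take_take]
          congr 1; omega
        rw [htk, hdp, hmidL, hdj]
        have hmidR : (A.drop p).take (j + 1 + 1 - 1 - p)
            = (A.drop p).take (j - p) ++ [A.getD j 0] := by
          have h1 : j + 1 + 1 - 1 - p = (j - p) + 1 := by omega
          rw [h1, List.take_add_one]
          have h3 : (A.drop p)[j - p]? = some (A.getD j 0) := by
            rw [List.getElem?_drop]
            have hpj : p + (j - p) = j := by omega
            rw [hpj, List.getElem?_eq_getElem (by omega : j < A.length)]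
            simp [List.getD, List.getElem?_eq_getElem (by omega : j < A.length)]
          simp [h3]
        rw [hmidR]
        simp
      · simp only [if_neg hgt]
        unfold spliceB
        rw [List.set_eq_take_append_cons_drop]
        simp [if_pos (by omega : j + 1 < A.length)]

theorem spliceB_len (A : List Int) (a : Int) (p m : Nat) (h1 : 1 ≤ m) (h2 : p ≤ m - 1)
    (h3 : m ≤ A.length) : (spliceB A a p m).length = A.length := by
  unfold spliceB
  simp
  omega

theorem stepB_len (A : List Int) (m : Nat) (h1 : 1 ≤ m) (h3 : m ≤ A.length) :
    (stepB A m).length = A.length := by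
  unfold stepB
  exact spliceB_len _ _ _ _ h1 (findPos_le _ _ _) h3

theorem tp01 (A : List Int) (z : Int) (i j : Nat) : tpA A z i j = 0 ∨ tpA A z i j = 1 := by
  fun_induction tpA with
  | case1 => right; rfl
  | case2 => assumption
  | case3 => assumption
  | case4 => left; rfl

theorem tp_eq (A : List Int) (z : Int) (i j : Nat) : tpA A z i j = tpB A z i j := by
  fun_induction tpA with
  | case1 i j h h2 =>
      rw [tpB, if_neg (by omega : ¬ j ≤ i)]
      simp only [List.getD] at h2
      simp [h2]
  | case2 i j h h2 h3 ih =>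
      rw [tpB, if_neg (by omega : ¬ j ≤ i)]
      simp only [List.getD] at h2 h3
      simp [h2, h3, ih]
  | case3 i j h h2 h3 ih =>
      rw [tpB, if_neg (by omega : ¬ j ≤ i)]
      simp only [List.getD] at h2 h3
      simp [h2, h3, ih]
  | case4 i j h =>
      rw [tpB, if_pos (by omega : j ≤ i)]

theorem loop_len : ∀ (d m N : Nat) (A : List Int), N + 1 - m = d → 1 ≤ m → N ≤ A.length →
    (csLoopB A m N).2.length = A.length := by
  intro d
  induction d with
  | zero =>
      intro m N A hd h1 h2
      rw [csLoopB, if_pos (by omega)]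
  | succ k ih =>
      intro m N A hd h1 h2
      rw [csLoopB]
      by_cases hm : N < m
      · rw [if_pos hm]
      · rw [if_neg hm]
        have hlen : (stepB A m).length = A.length := stepB_len A m h1 (by omega)
        split
        · simpa using hlen
        · rw [ih (m + 1) N _ (by omega) (by omega) (by rw [hlen]; omega)]
          exact hlen

theorem loop01 : ∀ (d m N : Nat) (A : List Int), N + 1 - m = d →
    (csLoopB A m N).1 = 0 ∨ (csLoopB A m N).1 = 1 := by
  intro d
  induction d with
  | zero =>
      intro m N A hd
      rw [csLoopB, if_pos (by omega)]; left; rfl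
  | succ k ih =>
      intro m N A hd
      rw [csLoopB]
      by_cases hm : N < m
      · rw [if_pos hm]; left; rfl
      · rw [if_neg hm]
        split
        · right; rfl
        · exact ih (m + 1) N _ (by omega)

theorem loop_snoc (n : Nat) : ∀ (d m : Nat) (A : List Int), n + 1 - m = d → m ≤ n + 1 →
    csLoopB A m (n + 1) =
      (if (csLoopB A m n).1 ≠ 0 then csLoopB A m n
       else if tpB (stepB (csLoopB A m n).2 (n + 1)) ((stepB (csLoopB A m n).2 (n + 1)).getD n 0) 0 (n - 1) ≠ 0
            then (1, stepB (csLoopB A m n).2 (n + 1))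
            else (0, stepB (csLoopB A m n).2 (n + 1))) := by
  intro d
  induction d with
  | zero =>
      intro m A hd hm
      have hm' : m = n + 1 := by omega
      subst hm'
      have h0 : csLoopB A (n + 1) n = (0, A) := by rw [csLoopB, if_pos (by omega)]
      rw [h0, if_neg (by simp)]
      rw [csLoopB, if_neg (by omega)]
      rw [show n + 1 - 1 = n by omega, show n + 1 - 2 = n - 1 by omega]
      by_cases hhit : tpB (stepB A (n + 1)) ((stepB A (n + 1)).getD n 0) 0 (n - 1) ≠ 0
      · rw [if_pos hhit, if_pos hhit]
      · rw [if_neg hhit, if_neg hhit]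
        rw [csLoopB, if_pos (by omega)]
  | succ k ih =>
      intro m A hd hm
      have hL : csLoopB A m (n + 1) =
          if tpB (stepB A m) ((stepB A m).getD (m - 1) 0) 0 (m - 2) ≠ 0 then (1, stepB A m)
          else csLoopB (stepB A m) (m + 1) (n + 1) := by
        rw [csLoopB, if_neg (by omega)]
      have hR : csLoopB A m n =
          if tpB (stepB A m) ((stepB A m).getD (m - 1) 0) 0 (m - 2) ≠ 0 then (1, stepB A m)
          else csLoopB (stepB A m) (m + 1) n := by
        rw [csLoopB, if_neg (by omega)]
      rw [hL, hR]
      by_cases hhit : tpB (stepB A m) ((stepB A m).getD (m - 1) 0) 0 (m - 2) ≠ 0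
      · rw [if_pos hhit, if_pos hhit, if_pos (by simp)]
      · rw [if_neg hhit, if_neg hhit]
        exact ih (m + 1) (stepB A m) (by omega) (by omega)

theorem csRec_eq : ∀ (n : Nat) (A : List Int), n ≤ A.length →
    csRecA A n = csLoopB A 3 n := by
  intro n
  induction n with
  | zero => intro A h; rw [csRecA, if_pos (by omega), csLoopB, if_pos (by omega)]
  | succ n ih =>
      intro A h
      by_cases h3 : n + 1 < 3
      · rw [csRecA, if_pos h3, csLoopB, if_pos (by omega)]
      · rw [csRecA, if_neg h3]
        have hrec : csRecA A (n + 1 - 1) = csLoopB A 3 n := by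
          rw [show n + 1 - 1 = n by omega]; exact ih A (by omega)
        rw [hrec]
        rw [loop_snoc n (n + 1 - 3) 3 A (by omega) (by omega)]
        set p := csLoopB A 3 n with hp
        unfold csRecAfter
        by_cases hfst : p.1 ≠ 0
        · rw [if_pos hfst, if_pos hfst]
          have h01 := loop01 (n + 1 - 3) 3 n A rfl
          rw [← hp] at h01
          have h1 : p.1 = 1 := by rcases h01 with h' | h' <;> omega
          rw [← h1]
        · rw [if_neg hfst, if_neg hfst]
          have hplen : p.2.length = A.length := by
            have := loop_len (n + 1 - 3) 3 n A rfl (by omega) (by omega)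
            rw [← hp] at this; exact this
          have hidx : n < p.2.length := by omega
          have hins : insA (p.2.getD (n + 1 - 1) 0) p.2 (n + 1 - 1) = stepB p.2 (n + 1) := by
            rw [show n + 1 - 1 = n by omega]
            unfold stepB
            exact insA_eq (p.2.getD n 0) n p.2 hidx
          rw [hins]
          unfold csRecTail
          rw [show n + 1 - 1 = n by omega, show n + 1 - 2 = n - 1 by omega, tp_eq]
          set A2 := stepB p.2 (n + 1)
          have h01 : tpB A2 (A2.getD n 0) 0 (n - 1) = 0 ∨ tpB A2 (A2.getD n 0) 0 (n - 1) = 1 := by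
            rw [← tp_eq]; exact tp01 A2 (A2.getD n 0) 0 (n - 1)
          rcases h01 with h' | h' <;> simp only [List.getD] at h' <;> simp [h']

-- ===== VERDICT (by name: the statement is the Claim_ definition above) =====
theorem check_sum_n2_spec : Claim_equal_check_sum_n2 := by
  unfold Claim_equal_check_sum_n2
  intro A n _ hpre
  unfold Spec_check_sum_n2
  cases n with
  | none =>
      unfold check_sum_n2 check_sum_n2_alt
      simp only
      have hne : A.length ≠ 0 := by
        intro h0
        exact hpre (List.eq_nil_of_length_eq_zero h0)
      rw [if_neg hne, if_neg hne]
      by_cases hl : A.length < 3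
      · rw [if_pos hl, csRecA, if_pos hl]
      · rw [if_neg hl, csRec_eq A.length A (le_refl _)]
  | some m =>
      unfold check_sum_n2 check_sum_n2_alt
      simp only
      by_cases hm : m < 3
      · rw [if_pos hm, csRecA, if_pos (by omega : m.toNat < 3)]
      · rw [if_neg hm]
        have hle : m ≤ (A.length : Int) := by
          rcases hpre with h' | h'
          · omega
          · exact h'
        rw [csRec_eq m.toNat A (by omega)]
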